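-- pv_equiv track=rewrite | github.com/keshav2410garg/CPU-SCHEDULING-ALGORITHM-Analysis-VISUALIZER | fcfs_ganntchart.py | find_gantt_array
-- ===== SOURCE A (Python) =====
-- def find_gantt_array(pr_no, arrival, burst, n):
--     mix = list(zip(pr_no, arrival, burst))
--     result = {pr: [] for pr in pr_no}
--
--     for i in range(n):
--         # each element of mix is a tuple of form (pr_no, arrival, burst)
--         cur_pr = mix[i][0]
--         cur_arr = mix[i][1]
--         cur_burst = mix[i][2]
--
--         if i == 0:
--             # first item
--             result[cur_pr].append((cur_arr, cur_burst))
--             prev_end_time = cur_arr + cur_burst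
--         else:
--             if cur_arr >= prev_end_time:
--                 result[cur_pr].append((cur_arr, cur_burst))
--                 prev_end_time = cur_arr + cur_burst
--             else:
--                 result[cur_pr].append((prev_end_time, cur_burst))
--                 prev_end_time = prev_end_time + cur_burst
--
--     return result, prev_end_time
-- ===== SOURCE B (Python) =====
-- def find_gantt_array(pr_no, arrival, burst, n):
--     # Pass 1: start_i = total_i + max_{j<=i}(arrival_j - total_j), where total_i is the
--     # prefix sum of bursts; a running max of "slack" replaces A's prev_end recurrence.
--     starts = []
--     total = 0
--     best = None
--     for i in range(n):
--         slack = arrival[i] - total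
--         if best is None or slack > best:
--             best = slack
--         starts.append(best + total)
--         total += burst[i]
--     # Pass 2: group the intervals under their process numbers.
--     result = {pr: [] for pr in pr_no}
--     for i in range(n):
--         result[pr_no[i]].append((starts[i], burst[i]))
--     return result, best + total
-- ===== Notes on version B (the rewrite author's own statement) =====
-- stated objective: alternative
-- what changed: B drops A's prev_end branching recurrence: it computes each start as total_i + max_{j<=i}(arrival_j - total_j), maintaining a burst prefix sum and a running maximum of slack-adjusted arrivals, then groups the intervals under their process numbers in a separate pass.
import Mathlib
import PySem

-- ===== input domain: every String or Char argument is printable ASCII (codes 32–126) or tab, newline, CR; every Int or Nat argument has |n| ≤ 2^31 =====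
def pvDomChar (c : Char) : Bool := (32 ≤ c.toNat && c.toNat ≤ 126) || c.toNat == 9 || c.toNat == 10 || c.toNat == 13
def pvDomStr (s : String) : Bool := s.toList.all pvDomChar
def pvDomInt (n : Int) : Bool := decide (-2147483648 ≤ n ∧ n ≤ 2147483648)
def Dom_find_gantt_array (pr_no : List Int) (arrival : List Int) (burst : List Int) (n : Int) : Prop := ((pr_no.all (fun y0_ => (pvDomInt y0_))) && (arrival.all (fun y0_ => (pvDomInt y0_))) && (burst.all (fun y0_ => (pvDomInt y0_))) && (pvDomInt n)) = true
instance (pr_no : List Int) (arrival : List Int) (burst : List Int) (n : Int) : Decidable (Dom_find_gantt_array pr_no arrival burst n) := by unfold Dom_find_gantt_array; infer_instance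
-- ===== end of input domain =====

-- B replaces A's prev_end branching recurrence by a burst prefix sum plus a running maximum of
-- slack-adjusted arrivals (start_i = total_i + max slack), with a separate grouping pass; proven
-- equal on Pre_ (where A returns).

-- ===== PORT A =====
-- A's loop body: prev_end is unbound before the first iteration, modelled as `Option Int`
-- (`none` = unbound; A's `i == 0` branch is exactly the `none` case, `i > 0` the `some` case).
def pvAstep (s : PySem.Dict Int (List (Int × Int)) × Option Int) (t : Int × Int × Int) :
    PySem.Dict Int (List (Int × Int)) × Option Int :=
  match s.2 with
  | none => (s.1.modify t.1 [] (fun l => l ++ [(t.2.1, t.2.2)]), some (t.2.1 + t.2.2))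
  | some prev =>
    if t.2.1 ≥ prev then
      (s.1.modify t.1 [] (fun l => l ++ [(t.2.1, t.2.2)]), some (t.2.1 + t.2.2))
    else
      (s.1.modify t.1 [] (fun l => l ++ [(prev, t.2.2)]), some (prev + t.2.2))

-- A's loop body including the mix[i] lookup (none = IndexError, excluded by Pre_)
def pvAget (mix : List (Int × Int × Int)) (s : PySem.Dict Int (List (Int × Int)) × Option Int)
    (i : Int) : PySem.Dict Int (List (Int × Int)) × Option Int :=
  match PySem.List.pyGet? mix i with
  | none => s
  | some t => pvAstep s t

def find_gantt_array (pr_no : List Int) (arrival : List Int) (burst : List Int) (n : Int) : (List (Int × List (Int × Int))) × Int :=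
  let mix := pr_no.zip (arrival.zip burst)
  let result0 : PySem.Dict Int (List (Int × Int)) :=
    pr_no.foldl (fun d pr => d.insert pr []) PySem.Dict.empty
  let st := (PySem.List.pyRange 0 n 1).foldl (pvAget mix) (result0, (none : Option Int))
  (st.1.items, st.2.getD 0)  -- outside Pre_ (n ≤ 0) prev_end is unbound in Python; 0 is the port's total-default

-- ===== PORT B =====
-- B's pass-1 body: state (starts, total, best); arrival[i]/burst[i] lookups (none = IndexError,
-- excluded by Pre_)
def pvB1step (arrival burst : List Int) (s : List Int × Int × Option Int) (i : Int) :
    List Int × Int × Option Int :=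
  match PySem.List.pyGet? arrival i, PySem.List.pyGet? burst i with
  | some a, some b =>
    let slack := a - s.2.1
    let best := match s.2.2 with
      | none => slack
      | some x => if slack > x then slack else x
    (s.1 ++ [best + s.2.1], s.2.1 + b, some best)
  | _, _ => s

-- B's pass-2 body: pr_no[i]/starts[i]/burst[i] lookups, append under the process number
def pvB2step (pr_no starts burst : List Int) (d : PySem.Dict Int (List (Int × Int))) (i : Int) :
    PySem.Dict Int (List (Int × Int)) :=
  match PySem.List.pyGet? pr_no i, PySem.List.pyGet? starts i, PySem.List.pyGet? burst i with
  | some p, some st, some b => d.modify p [] (fun l => l ++ [(st, b)])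
  | _, _, _ => d

def find_gantt_array_alt (pr_no : List Int) (arrival : List Int) (burst : List Int) (n : Int) : (List (Int × List (Int × Int))) × Int :=
  let p1 := (PySem.List.pyRange 0 n 1).foldl (pvB1step arrival burst) ([], 0, (none : Option Int))
  let result0 : PySem.Dict Int (List (Int × Int)) :=
    pr_no.foldl (fun d pr => d.insert pr []) PySem.Dict.empty
  let result := (PySem.List.pyRange 0 n 1).foldl (pvB2step pr_no p1.1 burst) result0
  (result.items, (p1.2.2.map (· + p1.2.1)).getD 0)  -- outside Pre_ (n ≤ 0) best is None in Python; 0 is the port's total-default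

-- ===== PRECONDITION & SPEC =====
-- Exactly where the Python A returns: otherwise it raises (UnboundLocalError when n ≤ 0,
-- IndexError when n exceeds the zipped length).
def Pre_find_gantt_array (pr_no : List Int) (arrival : List Int) (burst : List Int) (n : Int) : Prop :=
  1 ≤ n ∧ n ≤ (pr_no.length : Int) ∧ n ≤ (arrival.length : Int) ∧ n ≤ (burst.length : Int)
instance (pr_no : List Int) (arrival : List Int) (burst : List Int) (n : Int) : Decidable (Pre_find_gantt_array pr_no arrival burst n) := by unfold Pre_find_gantt_array; infer_instance

def pvWitness_find_gantt_array : List Int × List Int × List Int × Int := ([1, 2, 1], [0, 4, 3], [2, 2, 5], 3)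

def Spec_find_gantt_array (pr_no : List Int) (arrival : List Int) (burst : List Int) (n : Int) (out : (List (Int × List (Int × Int))) × Int) : Prop := out = find_gantt_array_alt pr_no arrival burst n
instance (pr_no : List Int) (arrival : List Int) (burst : List Int) (n : Int) (out : (List (Int × List (Int × Int))) × Int) : Decidable (Spec_find_gantt_array pr_no arrival burst n out) := by unfold Spec_find_gantt_array; infer_instance

-- ===== CLAIM (what is proved, stated in full; the proofs are below) =====
def Claim_equal_find_gantt_array : Prop := ∀ (pr_no : List Int) (arrival : List Int) (burst : List Int) (n : Int), Dom_find_gantt_array pr_no arrival burst n → Pre_find_gantt_array pr_no arrival burst n → Spec_find_gantt_array pr_no arrival burst n (find_gantt_array pr_no arrival burst n)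

-- ===== LEMMAS AND PROOFS =====

-- pure (index-free) forms of the two B loop bodies
def pvBpair (s : List Int × Int × Option Int) (ab : Int × Int) : List Int × Int × Option Int :=
  let slack := ab.1 - s.2.1
  let best := match s.2.2 with
    | none => slack
    | some x => if slack > x then slack else x
  (s.1 ++ [best + s.2.1], s.2.1 + ab.2, some best)

def pvGroup (d : PySem.Dict Int (List (Int × Int))) (x : Int × Int × Int) :
    PySem.Dict Int (List (Int × Int)) :=
  d.modify x.1 [] (fun l => l ++ [(x.2.1, x.2.2)])

-- the start times produced by B's pass 1 on jobs `pairs` from state (total, best)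
def pvSt : List (Int × Int) → Int → Option Int → List Int
  | [], _, _ => []
  | ab :: t, total, best =>
    let b' := match best with
      | none => ab.1 - total
      | some x => if ab.1 - total > x then ab.1 - total else x
    (b' + total) :: pvSt t (total + ab.2) (some b')

-- the final (total, best) state of B's pass 1
def pvFin : List (Int × Int) → Int → Option Int → Int × Option Int
  | [], total, best => (total, best)
  | ab :: t, total, best =>
    let b' := match best with
      | none => ab.1 - total
      | some x => if ab.1 - total > x then ab.1 - total else x
    pvFin t (total + ab.2) (some b')

-- a fold of `h` over range(m) that reads xs[k] at step k is a fold over the first m elements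
lemma pv_fold_range_get {α σ : Type} (xs : List α) (g : σ → α → σ) (h : σ → Int → σ)
    (hcomp : ∀ (s : σ) (k : Nat) (hk : k < xs.length), h s (k : Int) = g s (xs[k]'hk))
    (m : Nat) (hm : m ≤ xs.length) (s : σ) :
    (PySem.List.pyRange 0 (m : Int) 1).foldl h s = (xs.take m).foldl g s := by
  induction m generalizing s with
  | zero => simp [PySem.List.pyRange_one_eq_nil]
  | succ k ih =>
    have hk : k < xs.length := by omega
    rw [show ((k + 1 : Nat) : Int) = (k : Int) + 1 by push_cast; ring,
        PySem.List.pyRange_one_succ_right (by positivity), List.foldl_append, ih (by omega)]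
    simp only [List.foldl_cons, List.foldl_nil]
    rw [List.take_add_one, List.getElem?_eq_getElem hk, Option.toList_some, List.foldl_append]
    simp [hcomp _ k hk]

-- B's pass 1 accumulates pvSt and ends in the state pvFin
lemma pv_pass1 (pairs : List (Int × Int)) :
    ∀ (acc : List Int) (total : Int) (best : Option Int),
    pairs.foldl pvBpair (acc, total, best)
      = (acc ++ pvSt pairs total best, pvFin pairs total best) := by
  induction pairs with
  | nil => simp [pvSt, pvFin]
  | cons ab t ih =>
    intro acc total best
    simp only [List.foldl_cons, pvBpair, pvSt, pvFin, ih, List.append_assoc, List.singleton_append]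

lemma pvSt_length (pairs : List (Int × Int)) :
    ∀ (total : Int) (best : Option Int), (pvSt pairs total best).length = pairs.length := by
  induction pairs with
  | nil => intro _ _; simp [pvSt]
  | cons ab t ih => intro total best; simp [pvSt, ih]

-- core: A's fused fold equals B's grouping fold over the pvSt start times, with the same end,
-- under the invariant prev_end = best + total
lemma pv_main : ∀ (pairs : List (Int × Int)) (pr : List Int)
    (d : PySem.Dict Int (List (Int × Int))) (total : Int) (best : Option Int),
    pairs.length ≤ pr.length →
    (pr.zip pairs).foldl pvAstep (d, best.map (· + total))
      = ((pr.zip ((pvSt pairs total best).zip (pairs.map Prod.snd))).foldl pvGroup d,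
         (pvFin pairs total best).2.map (· + (pvFin pairs total best).1)) := by
  intro pairs
  induction pairs with
  | nil => intro pr d total best _; simp [pvSt, pvFin]
  | cons ab t ih =>
    intro pr d total best hlen
    cases pr with
    | nil => simp at hlen
    | cons r rt =>
      simp only [List.map_cons, List.zip_cons_cons, List.foldl_cons, pvSt, pvFin]
      have hstep : ∀ b' : Int,
          (b' = match best with
            | none => ab.1 - total
            | some x => if ab.1 - total > x then ab.1 - total else x) →
          pvAstep (d, best.map (· + total)) (r, ab)
            = (pvGroup d (r, b' + total, ab.2), Option.map (· + (total + ab.2)) (some b')) := by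
        intro b' hb'
        cases best with
        | none =>
          have hbx : b' = ab.1 - total := hb'
          subst hbx
          simp only [Option.map_none, Option.map_some, pvAstep, pvGroup]
          rw [show ab.1 - total + total = ab.1 from by ring,
              show ab.1 - total + (total + ab.2) = ab.1 + ab.2 from by ring]
        | some x =>
          have hbx : b' = if ab.1 - total > x then ab.1 - total else x := hb'
          simp only [Option.map_some, pvAstep, pvGroup]
          split_ifs with h
          · -- ab.1 ≥ x + total
            have hb : b' + total = ab.1 := by rw [hbx]; split_ifs with h2 <;> omega
            have hb2 : b' + (total + ab.2) = ab.1 + ab.2 := by omega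
            rw [hb, hb2]
          · -- ab.1 < x + total : best stays x
            have hb : b' = x := by rw [hbx]; split_ifs with h2 <;> omega
            rw [hb, show x + total + ab.2 = x + (total + ab.2) from by ring]
      rw [hstep _ rfl, ih rt _ (total + ab.2) (some _) (by simpa using Nat.le_of_succ_le_succ (by simpa using hlen))]

-- zipping with a truncated right list is truncating the zip
lemma pv_zip_take_right {α β : Type} : ∀ (m : Nat) (l : List α) (t : List β),
    l.zip (t.take m) = (l.zip t).take m := by
  intro m
  induction m with
  | zero => simp
  | succ k ih =>
    intro l t
    cases l with
    | nil => simp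
    | cons a l =>
      cases t with
      | nil => simp
      | cons b t => simp [List.zip_cons_cons, ih]

-- the second components of a truncated zip are the truncated right list
lemma pv_map_snd_zip_take {α β : Type} : ∀ (m : Nat) (l : List α) (t : List β),
    m ≤ l.length → ((l.zip t).take m).map Prod.snd = t.take m := by
  intro m
  induction m with
  | zero => simp
  | succ k ih =>
    intro l t hm
    cases l with
    | nil => simp at hm
    | cons a l =>
      cases t with
      | nil => simp
      | cons b t =>
        simp only [List.zip_cons_cons, List.take_succ_cons, List.map_cons]
        rw [ih l t (by simpa using Nat.le_of_succ_le_succ hm)]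

-- ===== VERDICT (by name: the statement is the Claim_ definition above) =====
theorem find_gantt_array_spec : Claim_equal_find_gantt_array := by
  intro pr_no arrival burst n _ hpre
  obtain ⟨h1, h2, h3, h4⟩ := hpre
  unfold Spec_find_gantt_array find_gantt_array find_gantt_array_alt
  simp only []
  set m : Nat := n.toNat with hm
  have hn : n = (m : Int) := by omega
  have hmp : m ≤ pr_no.length := by omega
  have hma : m ≤ arrival.length := by omega
  have hmb : m ≤ burst.length := by omega
  set pairs : List (Int × Int) := (arrival.zip burst).take m with hpairs
  have hplen : pairs.length = m := by
    rw [hpairs, List.length_take, List.length_zip]; omega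
  -- A's fold over range(n) is a fold of pvAstep over mix.take m
  have hA : (PySem.List.pyRange 0 n 1).foldl (pvAget (pr_no.zip (arrival.zip burst)))
        (pr_no.foldl (fun d pr => d.insert pr []) PySem.Dict.empty, (none : Option Int))
      = (pr_no.zip pairs).foldl pvAstep
        (pr_no.foldl (fun d pr => d.insert pr []) PySem.Dict.empty, (none : Option Int)) := by
    rw [hn, pv_fold_range_get (pr_no.zip (arrival.zip burst)) pvAstep _
        (by intro s k hk
            simp [pvAget, PySem.List.pyGet?_natCast, List.getElem?_eq_getElem hk])
        m (by rw [List.length_zip, List.length_zip]; omega),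
      hpairs, pv_zip_take_right]
  -- B's pass 1 over range(n) is a fold of pvBpair over pairs
  have hB1 : (PySem.List.pyRange 0 n 1).foldl (pvB1step arrival burst)
        ([], 0, (none : Option Int))
      = (pvSt pairs 0 none, pvFin pairs 0 none) := by
    rw [hn, pv_fold_range_get pairs pvBpair _
        (by intro s k hk
            rw [hplen] at hk
            have hk1 : k < arrival.length := by omega
            have hk2 : k < burst.length := by omega
            have hel : pairs[k]'(by omega) = (arrival[k], burst[k]) := by
              simp [hpairs, List.getElem_take, List.getElem_zip]
            simp [pvB1step, pvBpair, PySem.List.pyGet?_natCast,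
              List.getElem?_eq_getElem hk1, List.getElem?_eq_getElem hk2, hel])
        m (by omega) _, List.take_of_length_le (by omega), pv_pass1]
    simp
  rw [hA, hB1]
  simp only []
  -- B's pass 2 over range(n) is the grouping fold pvGroup over the zipped triples
  set S : List Int := pvSt pairs 0 none with hS
  have hSlen : S.length = m := by rw [hS, pvSt_length]; omega
  have hB2 : (PySem.List.pyRange 0 n 1).foldl (pvB2step pr_no S burst)
        (pr_no.foldl (fun d pr => d.insert pr []) PySem.Dict.empty)
      = ((pr_no.zip (S.zip burst)).take m).foldl pvGroup
        (pr_no.foldl (fun d pr => d.insert pr []) PySem.Dict.empty) := by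
    rw [hn, pv_fold_range_get (pr_no.zip (S.zip burst)) pvGroup _
        (by intro s k hk
            simp only [List.length_zip] at hk
            have hk1 : k < pr_no.length := by omega
            have hk2 : k < S.length := by omega
            have hk3 : k < burst.length := by omega
            simp [pvB2step, pvGroup, PySem.List.pyGet?_natCast,
              List.getElem?_eq_getElem hk1, List.getElem?_eq_getElem hk2,
              List.getElem?_eq_getElem hk3, List.getElem_zip])
        m (by simp only [List.length_zip]; omega)]
  rw [hB2]
  -- identify the two grouping folds via pv_main
  have hmapsnd : pairs.map Prod.snd = burst.take m := by
    rw [hpairs, pv_map_snd_zip_take m arrival burst hma]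
  have hMain := pv_main pairs pr_no
      (pr_no.foldl (fun d pr => d.insert pr []) PySem.Dict.empty) 0 none (by omega)
  rw [hmapsnd, pv_zip_take_right m (pvSt pairs 0 none) burst,
      pv_zip_take_right m pr_no ((pvSt pairs 0 none).zip burst), ← hS] at hMain
  simp only [Option.map_none] at hMain
  rw [hMain]
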